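-- pv_equiv track=rewrite | github.com/PacoPakkun/education | year1/programming_fundamentals/lab3.py | secventa_relativ_prime
-- ===== SOURCE A (Python) =====
-- def cmmdc(a,b):
--     #primeste prin parametru 2 valori intregi a,b
--     #returneaza cel mai mare divizor comun al celor 2 numere
--     a=abs(a)
--     b=abs(b)
--     if a==0:
--         return b
--     elif b==0:
--         return a
--     elif (a==1)or(b==1):
--         return 1
--     else:
--         while a!=b:
--             if a>b:
--                 a-=b
--             else:
--                 b-=a
--         return a
--
-- def secventa_relativ_prime(l):
--     #gaseste secventa de lungime maxima care contine doar valori relativ prime consecutiv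
--     #primeste prin parametru o lista l
--     #returneaza secventa gasita intr-o lista
--     max=-1
--     pmax=0
--     k=1
--     seq=[]
--     for i in range(0,len(l)-1):
--         if cmmdc(l[i],l[i+1])==1:
--             k+=1
--             if k>max:
--                 max=k
--                 pmax=i-k+2
--         else:
--             k=1
--     for i in range(pmax,pmax+max):
--         seq.append(l[i])
--     return seq
-- ===== SOURCE B (Python) =====
-- def _gcd(a, b):
--     a, b = abs(a), abs(b)
--     while b:
--         a, b = b, a % b
--     return a
--
-- def secventa_relativ_prime(l):
--     # table of adjacent-coprime flags, then pick the longest run of True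
--     adj = [_gcd(l[i], l[i + 1]) == 1 for i in range(len(l) - 1)]
--     runs = []          # maximal runs of True, as (start, pair_count)
--     start = None
--     for i, ok in enumerate(adj):
--         if ok and start is None:
--             start = i
--         elif not ok and start is not None:
--             runs.append((start, i - start))
--             start = None
--     if start is not None:
--         runs.append((start, len(adj) - start))
--     if not runs:
--         return []
--     s, c = max(runs, key=lambda r: r[1])
--     return l[s:s + c + 1]
-- ===== Notes on version B (the rewrite author's own statement) =====
-- stated objective: faster
-- what changed: A fuses counting, best-run tracking (via the i-k+2 index arithmetic) and a second element-copying loop into one pass calling a subtractive gcd; B first builds a boolean table of adjacent-coprime flags using a modulo-based Euclid gcd, collects the maximal runs of consecutive True flags as (start,length) pairs, picks the longest with max(key=length) (first on ties, matching A's earliest-run choice) and returns one slice l[s:s+c+1].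
import Mathlib
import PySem

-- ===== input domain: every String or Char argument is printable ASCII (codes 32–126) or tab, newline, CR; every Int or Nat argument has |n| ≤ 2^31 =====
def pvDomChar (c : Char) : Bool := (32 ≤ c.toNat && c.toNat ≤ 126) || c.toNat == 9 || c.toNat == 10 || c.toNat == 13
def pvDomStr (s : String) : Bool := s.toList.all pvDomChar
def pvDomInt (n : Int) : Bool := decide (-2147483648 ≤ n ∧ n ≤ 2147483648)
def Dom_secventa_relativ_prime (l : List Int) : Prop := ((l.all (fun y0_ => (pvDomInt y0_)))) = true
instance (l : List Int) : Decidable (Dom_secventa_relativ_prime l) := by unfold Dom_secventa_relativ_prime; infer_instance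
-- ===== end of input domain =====

-- B replaces A's fused counter loop + reconstruction loop (with its subtractive gcd) by an
-- adjacent-coprime table via modulo-based Euclid gcd, a scan collecting the maximal runs,
-- max() and one slice (objective: faster, measurably so on large values).

-- ===== PORT A =====
-- A's cmmdc: subtractive gcd; the 'while a != b' loop (entered with a,b ≥ 2)
def cmmdcLoop (a b : Int) : Int :=
  if _h : 0 < a ∧ 0 < b ∧ a ≠ b then
    if a > b then cmmdcLoop (a - b) b else cmmdcLoop a (b - a)
  else a
termination_by (a + b).toNat
decreasing_by all_goals omega

def cmmdc (a b : Int) : Int :=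
  let a' := |a|
  let b' := |b|
  if a' = 0 then b'
  else if b' = 0 then a'
  else if a' = 1 ∨ b' = 1 then 1
  else cmmdcLoop a' b'

def secventa_relativ_prime (l : List Int) : List Int :=
  let st := (PySem.List.pyRange 0 (PySem.List.len l - 1) 1).foldl
    (fun (st : Int × Int × Int) i =>
      if cmmdc (PySem.List.pyGetD l i 0) (PySem.List.pyGetD l (i + 1) 0) = 1 then
        let k' := st.2.2 + 1
        if k' > st.1 then (k', i - k' + 2, k') else (st.1, st.2.1, k')
      else (st.1, st.2.1, 1))
    (-1, 0, 1)
  (PySem.List.pyRange st.2.1 (st.2.1 + st.1) 1).foldl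
    (fun seq i => seq ++ [PySem.List.pyGetD l i 0]) []

-- ===== PORT B =====
-- B's _gcd: Euclid by modulo
def gcdLoop (a b : Int) : Int :=
  if h : b ≠ 0 then gcdLoop b (PySem.Int.mod a b) else a
termination_by b.natAbs
decreasing_by
  rcases lt_or_gt_of_ne h with hb | hb
  · have := PySem.Int.mod_neg_bounds a hb; omega
  · have h1 := PySem.Int.mod_nonneg a hb
    have h2 := PySem.Int.mod_lt a hb; omega

def pyGcd (a b : Int) : Int := gcdLoop |a| |b|

def secventa_relativ_prime_alt (l : List Int) : List Int :=
  let adj := (PySem.List.pyRange 0 (PySem.List.len l - 1) 1).map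
    (fun i => pyGcd (PySem.List.pyGetD l i 0) (PySem.List.pyGetD l (i + 1) 0) == 1)
  let p := (PySem.List.enumerate adj 0).foldl
    (fun (st : List (Int × Int) × Option Int) q =>
      match st.2 with
      | none => if q.2 then (st.1, some q.1) else st
      | some s => if q.2 then st else (st.1 ++ [(s, q.1 - s)], none))
    ([], none)
  let runs := match p.2 with
    | some s => p.1 ++ [(s, PySem.List.len adj - s)]
    | none => p.1
  match PySem.List.max? runs (fun r => r.2) with
  | none => []
  | some r => PySem.List.slice l (some r.1) (some (r.1 + r.2 + 1))

-- ===== PRECONDITION & SPEC =====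
def Spec_secventa_relativ_prime (l : List Int) (out : List Int) : Prop := out = secventa_relativ_prime_alt l
instance (l : List Int) (out : List Int) : Decidable (Spec_secventa_relativ_prime l out) := by unfold Spec_secventa_relativ_prime; infer_instance

-- ===== CLAIM (what is proved, stated in full; the proofs are below) =====
def Claim_equal_secventa_relativ_prime : Prop := ∀ (l : List Int), Dom_secventa_relativ_prime l → Spec_secventa_relativ_prime l (secventa_relativ_prime l)

-- ===== LEMMAS AND PROOFS =====

-- the two gcd helpers both compute Int.gcd
lemma gcdLoop_eq (a b : Int) (ha : 0 ≤ a) (hb : 0 ≤ b) : gcdLoop a b = (Int.gcd a b : Int) := by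
  induction a, b using gcdLoop.induct with
  | case2 a b h =>
    simp only [ne_eq, not_not] at h; subst h
    rw [gcdLoop]; simp [Int.gcd, abs_of_nonneg ha]
  | case1 a b h ih =>
    have hbpos : 0 < b := lt_of_le_of_ne hb (Ne.symm h)
    have hm := PySem.Int.mod_nonneg a hbpos
    rw [gcdLoop, dif_pos h, ih hb hm]
    have hq := PySem.Int.floordiv_mul_add_mod a b
    have hmod : PySem.Int.mod a b = a - PySem.Int.floordiv a b * b := by omega
    rw [hmod, Int.gcd_sub_mul_right_right, Int.gcd_comm]

lemma pyGcd_eq (a b : Int) : pyGcd a b = (Int.gcd a b : Int) := by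
  rw [pyGcd, gcdLoop_eq _ _ (abs_nonneg a) (abs_nonneg b)]
  simp [Int.gcd, Int.natAbs_abs]

lemma cmmdcLoop_eq : ∀ a b : Int, 0 < a → 0 < b → cmmdcLoop a b = (Int.gcd a b : Int) := by
  intro a b
  induction a, b using cmmdcLoop.induct with
  | case3 a b h =>
    intro ha hb
    have hab : a = b := by by_contra hne; exact h ⟨ha, hb, hne⟩
    subst hab
    rw [cmmdcLoop, dif_neg h, Int.gcd_self]
    omega
  | case1 a b h hgt ih =>
    intro ha hb
    rw [cmmdcLoop, dif_pos h, if_pos hgt, ih (by omega) hb]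
    rw [Int.gcd_comm, Int.gcd_comm a b]
    have := Int.gcd_sub_mul_right_right b a 1
    simpa using this
  | case2 a b h hle ih =>
    intro ha hb
    rw [cmmdcLoop, dif_pos h, if_neg hle, ih ha (by omega)]
    have := Int.gcd_sub_mul_right_right a b 1
    simpa using this

lemma cmmdc_eq (a b : Int) : cmmdc a b = pyGcd a b := by
  rw [pyGcd_eq]
  simp only [cmmdc]
  have hA : |a| = (a.natAbs : Int) := Int.abs_eq_natAbs a
  have hB : |b| = (b.natAbs : Int) := Int.abs_eq_natAbs b
  by_cases h0 : |a| = 0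
  · have : a = 0 := abs_eq_zero.mp h0
    subst this; simp [Int.gcd, abs_of_nonneg, Int.natAbs_abs]
  · by_cases h1 : |b| = 0
    · have : b = 0 := abs_eq_zero.mp h1
      subst this; simp [h0, Int.gcd, abs_of_nonneg, Int.natAbs_abs]
    · by_cases h2 : |a| = 1 ∨ |b| = 1
      · simp only [h0, h1, h2, if_false, if_true]
        rcases h2 with h2 | h2
        · have : a.natAbs = 1 := by omega
          simp [Int.gcd, this]
        · have : b.natAbs = 1 := by omega
          simp [Int.gcd, this]
      · simp only [h0, h1, h2, if_false]
        rw [cmmdcLoop_eq _ _ (by have := abs_nonneg a; omega) (by have := abs_nonneg b; omega)]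
        simp [Int.gcd, Int.natAbs_abs]

-- abstract step functions (c i = "l[i] and l[i+1] are coprime")
def condB (l : List Int) (i : Int) : Bool :=
  pyGcd (PySem.List.pyGetD l i 0) (PySem.List.pyGetD l (i + 1) 0) == 1

def stepA (c : Int → Bool) (st : Int × Int × Int) (i : Int) : Int × Int × Int :=
  if c i then
    let k' := st.2.2 + 1
    if k' > st.1 then (k', i - k' + 2, k') else (st.1, st.2.1, k')
  else (st.1, st.2.1, 1)

def stepB (c : Int → Bool) (st : List (Int × Int) × Option Int) (i : Int) :
    List (Int × Int) × Option Int :=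
  match st.2 with
  | none => if c i then (st.1, some i) else st
  | some s => if c i then st else (st.1 ++ [(s, i - s)], none)

-- candidate runs (closed ones plus the open one, as of position j), and A's (max, pmax) view
def cands (runs : List (Int × Int)) (start : Option Int) (j : Int) : List (Int × Int) :=
  runs ++ (start.elim [] (fun s => [(s, j - s)]))

def mxOf (cs : List (Int × Int)) : Int × Int :=
  (PySem.List.max? cs (fun r => r.2)).elim (-1, 0) (fun r => (r.2 + 1, r.1))

def RunInv (j : Int) (st : List (Int × Int) × Option Int) (stA : Int × Int × Int) : Prop :=
  stA.2.2 = 1 + (st.2.elim 0 (fun s => j - s))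
  ∧ (∀ r ∈ st.1, 0 ≤ r.1 ∧ 1 ≤ r.2 ∧ r.1 + r.2 ≤ j - 1)
  ∧ (st.2.elim True (fun s => 0 ≤ s ∧ s < j))
  ∧ (stA.1, stA.2.1) = mxOf (cands st.1 st.2 j)

lemma max?_append_singleton_none {α : Type} {xs : List α} {key : α → Int} (x : α)
    (h : PySem.List.max? xs key = none) :
    PySem.List.max? (xs ++ [x]) key = some x := by
  have hx : xs = [] := (PySem.List.max?_eq_none_iff _ _).mp h
  subst hx
  rfl

lemma max?_append_singleton_some {α : Type} {xs : List α} {key : α → Int} {m : α} (x : α)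
    (h : PySem.List.max? xs key = some m) :
    PySem.List.max? (xs ++ [x]) key = if key m < key x then some x else some m := by
  unfold PySem.List.max? at h ⊢
  rw [List.foldl_append, h]
  rfl

lemma step_inv (c : Int → Bool) (j : Int) (hj : 0 ≤ j)
    (st : List (Int × Int) × Option Int) (stA : Int × Int × Int)
    (h : RunInv j st stA) : RunInv (j + 1) (stepB c st j) (stepA c stA j) := by
  obtain ⟨runs, start⟩ := st
  obtain ⟨mx, pmax, k⟩ := stA
  obtain ⟨hk, hruns, hs, hmx⟩ := h
  simp only at hruns hmx
  cases start with
  | none =>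
    simp only [Option.elim_none] at hk hs
    have hc0 : cands runs none j = runs := by simp [cands]
    rw [hc0] at hmx
    cases hc : c j with
    | false =>
      have hstB : stepB c (runs, none) j = (runs, none) := by simp [stepB, hc]
      have hstA : stepA c (mx, pmax, k) j = (mx, pmax, 1) := by simp [stepA, hc]
      rw [hstB, hstA]
      refine ⟨by simp, fun r hr => by have := hruns r hr; omega, by simp, ?_⟩
      simpa [cands] using hmx
    | true =>
      have hstB : stepB c (runs, none) j = (runs, some j) := by simp [stepB, hc]
      have hcands : cands runs (some j) (j + 1) = runs ++ [(j, (1:Int))] := by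
        simp [cands]
      rcases hmr : PySem.List.max? runs (fun r => r.2) with _ | N
      · have hnil : runs = [] := (PySem.List.max?_eq_none_iff _ _).mp hmr
        subst hnil
        have hmx' : mx = -1 ∧ pmax = 0 := by
          rw [mxOf, hmr] at hmx
          simpa [Prod.ext_iff] using hmx
        have hstA : stepA c (mx, pmax, k) j = (k + 1, j - (k + 1) + 2, k + 1) := by
          simp only [stepA, hc, if_true]
          rw [if_pos (by omega)]
        rw [hstB, hstA]
        refine ⟨by simp; omega, fun r hr => by simp at hr, by simp; omega, ?_⟩
        rw [hcands, mxOf, max?_append_singleton_none _ hmr]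
        simp only [Option.elim_some, Prod.mk.injEq]
        omega
      · have hN := PySem.List.max?_mem hmr
        have hN2 : 1 ≤ N.2 := (hruns N hN).2.1
        have hmx' : mx = N.2 + 1 ∧ pmax = N.1 := by
          rw [mxOf, hmr] at hmx
          simpa [Prod.ext_iff] using hmx
        have hko : ¬ (k + 1 > mx) := by omega
        have hstA : stepA c (mx, pmax, k) j = (mx, pmax, k + 1) := by
          simp only [stepA, hc, if_true]
          rw [if_neg hko]
        have hnew : PySem.List.max? (runs ++ [(j, (1:Int))]) (fun r => r.2) = some N := by
          rw [max?_append_singleton_some _ hmr]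
          simp only []
          rw [if_neg (by simp; omega)]
        rw [hstB, hstA]
        refine ⟨by simp; omega, fun r hr => by have := hruns r hr; omega, by simp; omega, ?_⟩
        rw [hcands, mxOf, hnew]
        simp [hmx'.1, hmx'.2]
  | some s =>
    simp only [Option.elim_some] at hk hs
    have hc0 : cands runs (some s) j = runs ++ [(s, j - s)] := by simp [cands]
    rw [hc0] at hmx
    have hcands : cands runs (some s) (j + 1) = runs ++ [(s, j + 1 - s)] := by simp [cands]
    cases hc : c j with
    | false =>
      have hstB : stepB c (runs, some s) j = (runs ++ [(s, j - s)], none) := by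
        simp [stepB, hc]
      have hstA : stepA c (mx, pmax, k) j = (mx, pmax, 1) := by simp [stepA, hc]
      rw [hstB, hstA]
      refine ⟨by simp, ?_, by simp, ?_⟩
      · intro r hr
        rcases List.mem_append.mp hr with hr | hr
        · have := hruns r hr; omega
        · simp at hr; subst hr; simp; omega
      · simpa [cands] using hmx
    | true =>
      have hstB : stepB c (runs, some s) j = (runs, some s) := by simp [stepB, hc]
      rcases hmr : PySem.List.max? runs (fun r => r.2) with _ | N
      · have hnil : runs = [] := (PySem.List.max?_eq_none_iff _ _).mp hmr
        subst hnil
        have hold : PySem.List.max? ([] ++ [(s, j - s)]) (fun r => r.2) = some (s, j - s) :=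
          max?_append_singleton_none _ hmr
        have hmx' : mx = (j - s) + 1 ∧ pmax = s := by
          rw [mxOf, hold] at hmx
          simpa [Prod.ext_iff] using hmx
        have hstA : stepA c (mx, pmax, k) j = (k + 1, j - (k + 1) + 2, k + 1) := by
          simp only [stepA, hc, if_true]
          rw [if_pos (by omega)]
        rw [hstB, hstA]
        refine ⟨by simp; omega, fun r hr => by simp at hr, by simp; omega, ?_⟩
        rw [hcands, mxOf, max?_append_singleton_none _ hmr]
        simp only [Option.elim_some, Prod.mk.injEq]
        omega
      · have hN := PySem.List.max?_mem hmr
        have hN2 : 1 ≤ N.2 := (hruns N hN).2.1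
        have hNle : N.2 ≤ j - 1 - N.1 := by have := hruns N hN; omega
        by_cases hlt : N.2 < j - s
        · have hold : PySem.List.max? (runs ++ [(s, j - s)]) (fun r => r.2) =
              some (s, j - s) := by
            rw [max?_append_singleton_some _ hmr]
            exact if_pos (by simpa using hlt)
          have hmx' : mx = (j - s) + 1 ∧ pmax = s := by
            rw [mxOf, hold] at hmx
            simpa [Prod.ext_iff] using hmx
          have hstA : stepA c (mx, pmax, k) j = (k + 1, j - (k + 1) + 2, k + 1) := by
            simp only [stepA, hc, if_true]
            rw [if_pos (by omega)]
          have hnew : PySem.List.max? (runs ++ [(s, j + 1 - s)]) (fun r => r.2) =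
              some (s, j + 1 - s) := by
            rw [max?_append_singleton_some _ hmr]
            exact if_pos (by simp; omega)
          rw [hstB, hstA]
          refine ⟨by simp; omega, fun r hr => by have := hruns r hr; omega, by simp; omega, ?_⟩
          rw [hcands, mxOf, hnew]
          simp only [Option.elim_some, Prod.mk.injEq]
          omega
        · have hold : PySem.List.max? (runs ++ [(s, j - s)]) (fun r => r.2) = some N := by
            rw [max?_append_singleton_some _ hmr]
            exact if_neg (by simpa using hlt)
          have hmx' : mx = N.2 + 1 ∧ pmax = N.1 := by
            rw [mxOf, hold] at hmx
            simpa [Prod.ext_iff] using hmx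
          by_cases hko : k + 1 > mx
          · have hNeq : N.2 = j - s := by omega
            have hstA : stepA c (mx, pmax, k) j = (k + 1, j - (k + 1) + 2, k + 1) := by
              simp only [stepA, hc, if_true]
              rw [if_pos hko]
            have hnew : PySem.List.max? (runs ++ [(s, j + 1 - s)]) (fun r => r.2) =
                some (s, j + 1 - s) := by
              rw [max?_append_singleton_some _ hmr]
              exact if_pos (by simp; omega)
            rw [hstB, hstA]
            refine ⟨by simp; omega, fun r hr => by have := hruns r hr; omega, by simp; omega, ?_⟩
            rw [hcands, mxOf, hnew]
            simp only [Option.elim_some, Prod.mk.injEq]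
            omega
          · have hstA : stepA c (mx, pmax, k) j = (mx, pmax, k + 1) := by
              simp only [stepA, hc, if_true]
              rw [if_neg hko]
            have hnew : PySem.List.max? (runs ++ [(s, j + 1 - s)]) (fun r => r.2) = some N := by
              rw [max?_append_singleton_some _ hmr]
              exact if_neg (by simp; omega)
            rw [hstB, hstA]
            refine ⟨by simp; omega, fun r hr => by have := hruns r hr; omega, by simp; omega, ?_⟩
            rw [hcands, mxOf, hnew]
            simp [hmx'.1, hmx'.2]

lemma fold_inv (c : Int → Bool) (m : Int) : ∀ (fuel : Nat) (j : Int), 0 ≤ j →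
    (m - j).toNat = fuel → ∀ st stA, RunInv j st stA →
    RunInv (j + fuel) (((PySem.List.pyRange j m 1).foldl (stepB c) st))
      (((PySem.List.pyRange j m 1).foldl (stepA c) stA)) := by
  intro fuel
  induction fuel with
  | zero =>
    intro j hj hf st stA h
    rw [PySem.List.pyRange_one_eq_nil (by omega)]
    simpa using h
  | succ n ih =>
    intro j hj hf st stA h
    have hjm : j < m := by omega
    rw [PySem.List.pyRange_one_cons hjm]
    simp only [List.foldl_cons]
    have hres := ih (j + 1) (by omega) (by omega) _ _ (step_inv c j hj st stA h)
    have harith : j + ((n + 1 : Nat) : Int) = (j + 1) + (n : Int) := by push_cast; ring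
    rw [harith]
    exact hres

lemma enumerate_map_pyRange {α : Type} (f : Int → α) :
    ∀ (n : Nat) (a b : Int), (b - a).toNat = n →
      PySem.List.enumerate ((PySem.List.pyRange a b 1).map f) a
        = (PySem.List.pyRange a b 1).map (fun i => (i, f i)) := by
  intro n
  induction n with
  | zero =>
    intro a b hn
    rw [PySem.List.pyRange_one_eq_nil (by omega)]
    simp [PySem.List.enumerate]
  | succ m ih =>
    intro a b hn
    rw [PySem.List.pyRange_one_cons (by omega)]
    simp only [List.map_cons, PySem.List.enumerate_cons]
    rw [ih (a + 1) b (by omega)]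

lemma map_pyGetD_eq_slice (xs : List Int) (a b d : Int) (ha : 0 ≤ a) (hab : a ≤ b)
    (hb : b ≤ (xs.length : Int)) :
    (PySem.List.pyRange a b 1).map (fun i => PySem.List.pyGetD xs i d)
      = PySem.List.slice xs (some a) (some b) := by
  have hsplit := PySem.List.pyRange_one_append a b (PySem.List.len xs) hab
    (by simp [PySem.List.len_eq]; omega)
  have h1 := PySem.List.map_pyGetD_pyRange xs d ha
  have h2 := PySem.List.map_pyGetD_pyRange xs d (le_trans ha hab)
  rw [hsplit, List.map_append, h2] at h1
  rw [PySem.List.slice_of_nonneg xs ha (le_trans ha hab) (le_trans hab hb) hb]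
  rw [← h1]
  have hlenm : (List.map (fun i => PySem.List.pyGetD xs i d) (PySem.List.pyRange a b 1)).length
      = b.toNat - a.toNat := by
    simp [PySem.List.length_pyRange_one]
    omega
  rw [← hlenm, List.take_left]

lemma cands_bounds (M : Int) (runs : List (Int × Int)) (start : Option Int)
    (mx pmax k : Int) (h : RunInv M (runs, start) (mx, pmax, k)) :
    ∀ r ∈ cands runs start M, 0 ≤ r.1 ∧ 1 ≤ r.2 ∧ r.1 + r.2 ≤ M := by
  obtain ⟨_, hruns, hs, _⟩ := h
  simp only at hruns hs
  intro r hr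
  simp only [cands] at hr
  rcases List.mem_append.mp hr with hr' | hr'
  · have := hruns r hr'; omega
  · cases start with
    | none => simp at hr'
    | some s =>
      simp only [Option.elim_some, List.mem_singleton] at hr'
      subst hr'
      simp only [Option.elim_some] at hs
      refine ⟨by simp; omega, by simp; omega, by simp⟩

lemma final_case (l : List Int) (runs : List (Int × Int)) (start : Option Int)
    (C : List (Int × Int)) (stA : Int × Int × Int) (hlen : 1 ≤ l.length)
    (h : RunInv ((l.length : Int) - 1) (runs, start) stA)
    (hC : C = cands runs start ((l.length : Int) - 1)) :
    (PySem.List.pyRange stA.2.1 (stA.2.1 + stA.1) 1).foldl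
        (fun seq i => seq ++ [PySem.List.pyGetD l i 0]) []
      = (match PySem.List.max? C (fun r => r.2) with
         | none => ([] : List Int)
         | some r => PySem.List.slice l (some r.1) (some (r.1 + r.2 + 1))) := by
  obtain ⟨mx, pmax, k⟩ := stA
  obtain ⟨hk, hruns, hs, hmx⟩ := h
  simp only at hmx
  subst hC
  have hbounds := cands_bounds ((l.length : Int) - 1) runs start mx pmax k ⟨hk, hruns, hs, hmx⟩
  rcases hm : PySem.List.max? (cands runs start ((l.length : Int) - 1)) (fun r => r.2) with _ | r
  · rw [mxOf, hm] at hmx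
    simp only [Option.elim_none] at hmx
    have hmx1 : mx = -1 := congrArg Prod.fst hmx
    have hmx2 : pmax = 0 := congrArg Prod.snd hmx
    simp only [hmx1, hmx2]
    rw [PySem.List.pyRange_one_eq_nil (by omega)]
    rfl
  · rw [mxOf, hm] at hmx
    simp only [Option.elim_some] at hmx
    have hmx1 : mx = r.2 + 1 := congrArg Prod.fst hmx
    have hmx2 : pmax = r.1 := congrArg Prod.snd hmx
    have hr := hbounds r (PySem.List.max?_mem hm)
    simp only [hmx1, hmx2, PySem.List.foldl_append_singleton_eq_map, List.nil_append]
    have he : r.1 + (r.2 + 1) = r.1 + r.2 + 1 := by ring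
    rw [he, map_pyGetD_eq_slice l r.1 (r.1 + r.2 + 1) 0 (by omega) (by omega) (by omega)]

-- ===== VERDICT (by name: the statement is the Claim_ definition above) =====
theorem secventa_relativ_prime_spec : Claim_equal_secventa_relativ_prime := by
  unfold Claim_equal_secventa_relativ_prime
  intro l _
  unfold Spec_secventa_relativ_prime
  by_cases hnil : l = []
  · subst hnil; decide
  · have hlen : 1 ≤ l.length := by
      cases l with
      | nil => exact absurd rfl hnil
      | cons x xs => simp
    have hM0 : (0:Int) ≤ (l.length : Int) - 1 := by omega
    -- A's loop is the stepA fold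
    have hAfun : (fun (st : Int × Int × Int) i =>
        if cmmdc (PySem.List.pyGetD l i 0) (PySem.List.pyGetD l (i + 1) 0) = 1 then
          let k' := st.2.2 + 1
          if k' > st.1 then (k', i - k' + 2, k') else (st.1, st.2.1, k')
        else (st.1, st.2.1, 1)) = stepA (condB l) := by
      funext st i
      simp only [stepA, condB, cmmdc_eq, beq_iff_eq]
    -- B's loop is the stepB fold
    have hcond : (fun i => pyGcd (PySem.List.pyGetD l i 0) (PySem.List.pyGetD l (i + 1) 0) == 1)
        = condB l := rfl
    unfold secventa_relativ_prime secventa_relativ_prime_alt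
    simp only [PySem.List.len_eq, hAfun, hcond]
    rw [enumerate_map_pyRange (condB l) ((l.length : Int) - 1).toNat 0 ((l.length : Int) - 1)
      (by omega), List.foldl_map]
    have hBfun : (fun (st : List (Int × Int) × Option Int) (i : Int) =>
        (fun (st : List (Int × Int) × Option Int) (q : Int × Bool) =>
          match st.2 with
          | none => if q.2 then (st.1, some q.1) else st
          | some s => if q.2 then st else (st.1 ++ [(s, q.1 - s)], none)) st (i, condB l i))
        = stepB (condB l) := by
      funext st i
      cases hst : st.2 <;> simp [stepB, hst]
    rw [hBfun]
    -- run the invariant down the shared index range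
    have hinv0 : RunInv 0 ([], none) (-1, 0, 1) := by
      refine ⟨by simp, by simp, by simp, ?_⟩
      simp [cands, mxOf, PySem.List.max?]
    have hfold := fold_inv (condB l) ((l.length : Int) - 1) ((l.length : Int) - 1).toNat 0
      (le_refl 0) (by omega) ([], none) (-1, 0, 1) hinv0
    have hcast : (0:Int) + (((l.length : Int) - 1).toNat : Int) = (l.length : Int) - 1 := by
      omega
    rw [hcast] at hfold
    set stB := (PySem.List.pyRange 0 ((l.length : Int) - 1) 1).foldl (stepB (condB l)) ([], none)
      with hstB
    set stA := (PySem.List.pyRange 0 ((l.length : Int) - 1) 1).foldl (stepA (condB l)) (-1, 0, 1)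
      with hstA
    -- B's final run list is `cands` at position length-1
    have hcast2 : ((List.map (condB l) (PySem.List.pyRange 0 ((l.length : Int) - 1) 1)).length : Int)
        = (l.length : Int) - 1 := by
      simp [PySem.List.length_pyRange_one]
      omega
    rw [hcast2]
    have hres : RunInv ((l.length : Int) - 1) (stB.1, stB.2) stA := hfold
    cases hp : stB.2 with
    | none =>
      rw [hp] at hres
      exact final_case l stB.1 none stB.1 stA hlen hres (by simp [cands])
    | some s =>
      rw [hp] at hres
      exact final_case l stB.1 (some s) (stB.1 ++ [(s, (l.length : Int) - 1 - s)]) stA hlen hres rfl
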